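-- pv_equiv track=rewrite | github.com/William-CarterG/Algorithms-Competitive-Programming-Solutions | Lecture 3/12498 - Ant’s Shopping Mall.py | find_closest_zeros
-- ===== SOURCE A (Python) =====
-- def find_closest_zeros(mall, R, C):
--     left_zeros = [[0] * C for _ in range(R)]
--     right_zeros = [[0] * C for _ in range(R)]
--
--     for r in range(R):
--         # calculate closest left zero for each cell
--         closest_left_zero = -1
--         for c in range(C):
--             if mall[r][c] == '0':
--                 closest_left_zero = c
--             left_zeros[r][c] = closest_left_zero
--
--         # calculate closest right zero for each cell
--         closest_right_zero = C
--         for c in range(C - 1, -1, -1):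
--             if mall[r][c] == '0':
--                 closest_right_zero = c
--             right_zeros[r][c] = closest_right_zero
--
--     return left_zeros, right_zeros
-- ===== SOURCE B (Python) =====
-- def find_closest_zeros(mall, R, C):
--     # Run-length construction: collect the zero columns of each row once, then
--     # emit each constant segment between consecutive zeros as a block.
--     left_zeros, right_zeros = [], []
--     for r in range(R):
--         zs = [c for c in range(C) if mall[r][c] == '0']
--         row_left = []
--         prev, start = -1, 0
--         for z in zs:
--             row_left.extend([prev] * (z - start))
--             prev, start = z, z
--         row_left.extend([prev] * (C - start))
--         row_right = []
--         start = 0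
--         for z in zs:
--             row_right.extend([z] * (z + 1 - start))
--             start = z + 1
--         row_right.extend([C] * (C - start))
--         left_zeros.append(row_left)
--         right_zeros.append(row_right)
--     return left_zeros, right_zeros
-- ===== Notes on version B (the rewrite author's own statement) =====
-- stated objective: alternative
-- what changed: Instead of per-cell forward/backward running-accumulator scans writing into preallocated matrices, B collects each row's zero columns once and builds both rows by emitting the constant segments between consecutive zeros as replicated blocks.
import Mathlib
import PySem

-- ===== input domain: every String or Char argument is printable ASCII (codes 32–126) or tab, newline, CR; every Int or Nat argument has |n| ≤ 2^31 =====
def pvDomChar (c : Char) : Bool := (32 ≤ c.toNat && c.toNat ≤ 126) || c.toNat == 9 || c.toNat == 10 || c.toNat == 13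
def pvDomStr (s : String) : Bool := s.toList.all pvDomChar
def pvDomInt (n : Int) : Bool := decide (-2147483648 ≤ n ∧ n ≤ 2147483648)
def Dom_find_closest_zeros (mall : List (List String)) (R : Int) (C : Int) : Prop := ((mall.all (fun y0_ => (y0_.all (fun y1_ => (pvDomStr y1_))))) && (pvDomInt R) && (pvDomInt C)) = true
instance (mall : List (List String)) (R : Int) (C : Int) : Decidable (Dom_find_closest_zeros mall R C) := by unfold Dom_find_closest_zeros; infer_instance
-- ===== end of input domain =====

-- B replaces A's per-cell running-accumulator scans by collecting each row's zero
-- columns once and emitting the constant segments between consecutive zeros as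
-- replicated blocks (objective: alternative algorithm, same asymptotic cost).

-- ===== PORT A =====
-- Literal port of A.  r and c come from range() so they are ≥ 0 and .toNat is exact;
-- mall[r] / mall[r][c] are in range on Pre_, ported as getD (outside Pre_ Python raises).
-- A writes element-by-element into the preallocated [0]*C row of the matrix; the inner
-- fold carries that row ([0]*C, untouched before row r is processed) and sets each cell.
def find_closest_zeros (mall : List (List String)) (R : Int) (C : Int) : List (List Int) × List (List Int) :=
  -- [[0]*C for _ in range(R)]: the comprehension only builds [0]*C once per iterated r
  let init : List (List Int) := (List.range R.toNat).map (fun _ => List.replicate C.toNat 0)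
  (List.range R.toNat).foldl
    (fun (st : List (List Int) × List (List Int)) r =>
      -- closest left zero for each cell
      let left := (List.range C.toNat).foldl
        (fun (p : Int × List Int) c =>
          let cl := if (mall.getD r []).getD c "" == "0" then (c : Int) else p.1
          (cl, p.2.set c cl))
        (-1, List.replicate C.toNat 0)
      -- closest right zero for each cell (range(C-1,-1,-1) = reversed range(C))
      let right := (List.range C.toNat).reverse.foldl
        (fun (p : Int × List Int) c =>
          let cr := if (mall.getD r []).getD c "" == "0" then (c : Int) else p.1
          (cr, p.2.set c cr))
        (C, List.replicate C.toNat 0)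
      (st.1.set r left.2, st.2.set r right.2))
    (init, init)

-- ===== PORT B =====
-- Port of Source B: per row, zs = zero columns; the extend-loops become foldl with an
-- accumulator list; [x]*k for a possibly negative int k is replicate k.toNat x (exact).
def find_closest_zeros_alt (mall : List (List String)) (R : Int) (C : Int) : List (List Int) × List (List Int) :=
  let rows := (List.range R.toNat).map (fun r =>
    let row := mall.getD r []
    let zs := (List.range C.toNat).filter (fun c => row.getD c "" == "0")
    let pl := zs.foldl
      (fun (st : List Int × Int × Int) (z : Nat) =>
        (st.1 ++ List.replicate ((z : Int) - st.2.2).toNat st.2.1, (z : Int), (z : Int)))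
      ([], -1, 0)
    let row_left := pl.1 ++ List.replicate (C - pl.2.2).toNat pl.2.1
    let pr := zs.foldl
      (fun (st : List Int × Int) (z : Nat) =>
        (st.1 ++ List.replicate ((z : Int) + 1 - st.2).toNat (z : Int), (z : Int) + 1))
      ([], 0)
    let row_right := pr.1 ++ List.replicate (C - pr.2).toNat C
    (row_left, row_right))
  (rows.map Prod.fst, rows.map Prod.snd)

-- ===== PRECONDITION & SPEC =====
-- Exactly where Python A returns: if C ≥ 1 (otherwise the inner loops never index mall),
-- every row r < R must exist and have ≥ C cells (else mall[r] / mall[r][c] raises IndexError).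
def Pre_find_closest_zeros (mall : List (List String)) (R : Int) (C : Int) : Prop :=
  1 ≤ C → (R ≤ (mall.length : Int) ∧ ∀ row ∈ mall.take R.toNat, C ≤ (row.length : Int))
instance (mall : List (List String)) (R : Int) (C : Int) : Decidable (Pre_find_closest_zeros mall R C) := by
  unfold Pre_find_closest_zeros; infer_instance

def pvWitness_find_closest_zeros : List (List String) × Int × Int := ([["1", "0"], ["0", "1"]], 2, 2)

def Spec_find_closest_zeros (mall : List (List String)) (R : Int) (C : Int) (out : List (List Int) × List (List Int)) : Prop := out = find_closest_zeros_alt mall R C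
instance (mall : List (List String)) (R : Int) (C : Int) (out : List (List Int) × List (List Int)) : Decidable (Spec_find_closest_zeros mall R C out) := by unfold Spec_find_closest_zeros; infer_instance

-- ===== CLAIM (what is proved, stated in full; the proofs are below) =====
def Claim_equal_find_closest_zeros : Prop := ∀ (mall : List (List String)) (R : Int) (C : Int), Dom_find_closest_zeros mall R C → Pre_find_closest_zeros mall R C → Spec_find_closest_zeros mall R C (find_closest_zeros mall R C)

-- ===== LEMMAS AND PROOFS =====

-- proof-side vocabulary
def pvStep (row : List String) (a : Int) (c : Nat) : Int :=
  if row.getD c "" == "0" then (c : Int) else a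

-- recursive form of B's left extend-loop
def pvBuildL (C : Int) : Int → Int → List Nat → List Int
  | prev, start, [] => List.replicate (C - start).toNat prev
  | prev, start, z :: rest => List.replicate ((z : Int) - start).toNat prev ++ pvBuildL C (z : Int) (z : Int) rest

-- recursive form of B's right extend-loop
def pvBuildR (C : Int) : Int → List Nat → List Int
  | start, [] => List.replicate (C - start).toNat C
  | start, z :: rest => List.replicate ((z : Int) + 1 - start).toNat (z : Int) ++ pvBuildR C ((z : Int) + 1) rest

-- canonical value of a row in either output
def pvRowL (row : List String) (C : Int) : List Int :=
  (List.range C.toNat).map (fun c => (List.range (c + 1)).foldl (pvStep row) (-1))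
def pvRowR (row : List String) (C : Int) : List Int :=
  (List.range C.toNat).map (fun k => (List.range' k (C.toNat - k)).foldr (fun c a => pvStep row a c) C)

lemma pv_outer (fL fR : Nat → List Int) :
    ∀ (l : List Nat) (st1 st2 : List (List Int)),
      l.foldl (fun (st : List (List Int) × List (List Int)) r => (st.1.set r (fL r), st.2.set r (fR r))) (st1, st2)
      = (l.foldl (fun s r => s.set r (fL r)) st1, l.foldl (fun s r => s.set r (fR r)) st2) := by
  intro l
  induction l with
  | nil => intro st1 st2; rfl
  | cons x l ih => intro st1 st2; simp [List.foldl, ih]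

lemma pv_foldl_set_range {α : Type} (f : Nat → α) :
    ∀ (n : Nat) (L : List α), n ≤ L.length →
      (List.range n).foldl (fun acc r => acc.set r (f r)) L = (List.range n).map f ++ L.drop n := by
  intro n
  induction n with
  | zero => intro L _; simp
  | succ n ih =>
    intro L h
    rw [List.range_succ, List.foldl_append, ih L (by omega)]
    simp only [List.foldl]
    rw [List.set_append]
    simp only [List.length_map, List.length_range, lt_irrefl, if_neg (lt_irrefl n), Nat.sub_self]
    rw [List.drop_eq_getElem_cons (by omega : n < L.length)]
    simp [List.range_succ, List.set]

lemma pv_foldl_const (row : List String) :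
    ∀ (l : List Nat) (a : Int), (∀ k ∈ l, (row.getD k "" == "0") = false) →
      l.foldl (pvStep row) a = a := by
  intro l
  induction l with
  | nil => intro a _; rfl
  | cons x l ih =>
    intro a h
    simp only [List.foldl, pvStep, h x (by simp)]
    exact ih a (fun k hk => h k (by simp [hk]))

lemma pv_foldr_const (row : List String) :
    ∀ (l : List Nat) (a : Int), (∀ k ∈ l, (row.getD k "" == "0") = false) →
      l.foldr (fun c b => pvStep row b c) a = a := by
  intro l
  induction l with
  | nil => intro a _; rfl
  | cons x l ih =>
    intro a h
    simp only [List.foldr]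
    rw [ih a (fun k hk => h k (by simp [hk]))]
    simp only [pvStep, h x (by simp), Bool.false_eq_true, if_false]

lemma pv_left_inv (row : List String) :
    ∀ (n : Nat) (L : List Int), n ≤ L.length →
      (List.range n).foldl
        (fun (p : Int × List Int) c => (pvStep row p.1 c, p.2.set c (pvStep row p.1 c))) (-1, L)
      = ((List.range n).foldl (pvStep row) (-1),
         (List.range n).map (fun c => (List.range (c + 1)).foldl (pvStep row) (-1)) ++ L.drop n) := by
  intro n
  induction n with
  | zero => intro L _; simp
  | succ n ih =>
    intro L h
    rw [List.range_succ, List.foldl_append, ih L (by omega)]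
    simp only [List.foldl, Prod.mk.injEq]
    constructor
    · rw [List.foldl_append]; simp [List.foldl]
    · rw [List.set_append]
      simp only [List.length_map, List.length_range, lt_irrefl, Nat.sub_self]
      rw [List.drop_eq_getElem_cons (by omega : n < L.length)]
      simp [List.foldl_append, List.foldl, List.set, List.range_succ]

lemma pv_right_inv (row : List String) (cinit : Int) :
    ∀ (m n : Nat) (L : List Int), n + m ≤ L.length →
      (List.range' n m).foldr
        (fun c (p : Int × List Int) => (pvStep row p.1 c, p.2.set c (pvStep row p.1 c))) (cinit, L)
      = ((List.range' n m).foldr (fun c a => pvStep row a c) cinit,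
         L.take n ++ (List.range' n m).map
             (fun k => (List.range' k (n + m - k)).foldr (fun c a => pvStep row a c) cinit)
           ++ L.drop (n + m)) := by
  intro m
  induction m with
  | zero => intro n L h; simp
  | succ m ih =>
    intro n L h
    have harith : n + (m + 1) = (n + 1) + m := by omega
    rw [harith, List.range'_succ]
    simp only [List.foldr]
    rw [ih (n + 1) L (by omega)]
    simp only [List.map, Prod.mk.injEq]
    have hhead : (n + 1) + m - n = m + 1 := by omega
    rw [hhead]
    have hv : (List.range' n (m + 1)).foldr (fun c a => pvStep row a c) cinit
        = pvStep row ((List.range' (n + 1) m).foldr (fun c a => pvStep row a c) cinit) n := by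
      rw [List.range'_succ]; rfl
    rw [hv]
    refine ⟨trivial, ?_⟩
    set v := pvStep row ((List.range' (n + 1) m).foldr (fun c a => pvStep row a c) cinit) n with hvdef
    set M := (List.range' (n + 1) m).map
        (fun k => (List.range' k ((n + 1) + m - k)).foldr (fun c a => pvStep row a c) cinit) with hM
    have htlen : (L.take (n + 1)).length = n + 1 := by rw [List.length_take]; omega
    rw [List.set_append, if_pos (by simp only [List.length_append, htlen]; omega)]
    rw [List.set_append, if_pos (by rw [htlen]; omega)]
    rw [List.take_succ, List.getElem?_eq_getElem (by omega : n < L.length)]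
    simp only [Option.toList]
    rw [List.set_append, if_neg (by simp)]
    have h0 : n - min n L.length = 0 := by omega
    simp [List.append_assoc, List.set, h0]

lemma pv_filter_cons (p : Nat → Bool) :
    ∀ (m : Nat), ∀ (n z : Nat) (rest : List Nat),
      (List.range' n m).filter p = z :: rest →
      n ≤ z ∧ z < n + m ∧ p z = true ∧ (∀ k, n ≤ k → k < z → p k = false) ∧
        rest = (List.range' (z + 1) (n + m - (z + 1))).filter p := by
  intro m
  induction m with
  | zero => intro n z rest h; simp at h
  | succ m ih =>
    intro n z rest h
    rw [List.range'_succ] at h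
    by_cases hp : p n
    · rw [List.filter_cons_of_pos hp] at h
      obtain ⟨rfl, rfl⟩ : n = z ∧ (List.range' (n + 1) m).filter p = rest := by
        cases h; exact ⟨rfl, rfl⟩
      refine ⟨le_refl _, by omega, hp, fun k h1 h2 => absurd (lt_of_le_of_lt h1 h2) (lt_irrefl _), ?_⟩
      have : n + (m + 1) - (n + 1) = m := by omega
      rw [this]
    · rw [List.filter_cons_of_neg (by simpa using hp)] at h
      obtain ⟨h1, h2, h3, h4, h5⟩ := ih (n + 1) z rest h
      refine ⟨by omega, by omega, h3, ?_, ?_⟩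
      · intro k hk1 hk2
        rcases Nat.eq_or_lt_of_le hk1 with rfl | hlt
        · simpa using hp
        · exact h4 k hlt hk2
      · have : n + (m + 1) - (z + 1) = (n + 1) + m - (z + 1) := by omega
        rw [this]; exact h5

lemma pv_bridgeL (C : Int) :
    ∀ (zs : List Nat) (acc : List Int) (prev start : Int),
      (let p := zs.foldl
          (fun (st : List Int × Int × Int) (z : Nat) =>
            (st.1 ++ List.replicate ((z : Int) - st.2.2).toNat st.2.1, (z : Int), (z : Int)))
          (acc, prev, start);
        p.1 ++ List.replicate (C - p.2.2).toNat p.2.1) = acc ++ pvBuildL C prev start zs := by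
  intro zs
  induction zs with
  | nil => intro acc prev start; simp [pvBuildL]
  | cons z rest ih =>
    intro acc prev start
    simp only [List.foldl]
    rw [ih]
    simp [pvBuildL, List.append_assoc]

lemma pv_bridgeR (C : Int) :
    ∀ (zs : List Nat) (acc : List Int) (start : Int),
      (let p := zs.foldl
          (fun (st : List Int × Int) (z : Nat) =>
            (st.1 ++ List.replicate ((z : Int) + 1 - st.2).toNat (z : Int), (z : Int) + 1))
          (acc, start);
        p.1 ++ List.replicate (C - p.2).toNat C) = acc ++ pvBuildR C start zs := by
  intro zs
  induction zs with
  | nil => intro acc start; simp [pvBuildR]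
  | cons z rest ih =>
    intro acc start
    simp only [List.foldl]
    rw [ih]
    simp [pvBuildR, List.append_assoc]

lemma pv_foldl_set_range' {α : Type} (f : Nat → α) (n : Nat) (x : α) :
    (List.range n).foldl (fun acc r => acc.set r (f r)) (List.replicate n x) = (List.range n).map f := by
  rw [pv_foldl_set_range f n _ (by simp)]
  simp

lemma pv_buildL_spec (row : List String) (C : Int) (Cn : Nat) (hC : (Cn : Int) = C) :
    ∀ (m n start : Nat) (prev : Int), start ≤ n → n + m = Cn →
      pvBuildL C prev start ((List.range' n m).filter (fun c => row.getD c "" == "0"))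
      = (List.range' start (Cn - start)).map
          (fun c => (List.range' n (c + 1 - n)).foldl (pvStep row) prev) := by
  intro m
  induction m using Nat.strong_induction_on with
  | _ m IH =>
  intro n start prev hsn hnm
  cases hf : (List.range' n m).filter (fun c => row.getD c "" == "0") with
  | nil =>
    have hz : ∀ k ∈ List.range' n m, (row.getD k "" == "0") = false := by
      intro k hk
      have := List.filter_eq_nil_iff.mp hf k hk
      simpa using this
    simp only [pvBuildL]
    rw [show (C - (start : Int)).toNat = Cn - start by omega]
    symm
    rw [List.eq_replicate_iff]
    refine ⟨by simp, ?_⟩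
    intro b hb
    obtain ⟨c, hc, rfl⟩ := List.mem_map.mp hb
    have hcm := List.mem_range'_1.mp hc
    apply pv_foldl_const
    intro k hk
    have hkm := List.mem_range'_1.mp hk
    exact hz k (List.mem_range'_1.mpr ⟨by omega, by omega⟩)
  | cons z rest =>
    obtain ⟨h1, h2, h3, h4, h5⟩ := pv_filter_cons _ m n z rest hf
    simp only [pvBuildL]
    have hm1 : n + m - (z + 1) < m := by omega
    rw [h5, IH (n + m - (z + 1)) hm1 (z + 1) z (z : Int) (by omega) (by omega)]
    have hsplit : List.range' start (Cn - start) = List.range' start (z - start) ++ List.range' z (Cn - z) := by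
      have hA := List.range'_append (s := start) (m := z - start) (n := Cn - z) (step := 1)
      rw [show start + 1 * (z - start) = z by omega, show (z - start) + (Cn - z) = Cn - start by omega] at hA
      exact hA.symm
    rw [hsplit, List.map_append]
    congr 1
    · rw [show ((z : Int) - (start : Int)).toNat = z - start by omega]
      symm
      rw [List.eq_replicate_iff]
      refine ⟨by simp, ?_⟩
      intro b hb
      obtain ⟨c, hc, rfl⟩ := List.mem_map.mp hb
      have hcm := List.mem_range'_1.mp hc
      apply pv_foldl_const
      intro k hk
      have hkm := List.mem_range'_1.mp hk
      exact h4 k (by omega) (by omega)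
    · symm
      apply List.map_congr_left
      intro c hc
      have hcm := List.mem_range'_1.mp hc
      have hs1 : List.range' n (c + 1 - n) = List.range' n (z - n) ++ List.range' z (c + 1 - z) := by
        have hA := List.range'_append (s := n) (m := z - n) (n := c + 1 - z) (step := 1)
        rw [show n + 1 * (z - n) = z by omega, show (z - n) + (c + 1 - z) = c + 1 - n by omega] at hA
        exact hA.symm
      have hs2 : List.range' z (c + 1 - z) = z :: List.range' (z + 1) (c - z) := by
        rw [show c + 1 - z = (c - z) + 1 by omega, List.range'_succ]
      rw [hs1, List.foldl_append]
      rw [pv_foldl_const row _ prev (by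
        intro k hk
        have hkm := List.mem_range'_1.mp hk
        exact h4 k (by omega) (by omega))]
      rw [hs2]
      simp only [List.foldl, pvStep, h3, if_pos]
      rw [show c + 1 - (z + 1) = c - z by omega]

lemma pv_buildR_spec (row : List String) (C : Int) (Cn : Nat) (hC : (Cn : Int) = C) :
    ∀ (m n : Nat), n + m = Cn →
      pvBuildR C (n : Int) ((List.range' n m).filter (fun c => row.getD c "" == "0"))
      = (List.range' n m).map
          (fun k => (List.range' k (Cn - k)).foldr (fun c a => pvStep row a c) C) := by
  intro m
  induction m using Nat.strong_induction_on with
  | _ m IH =>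
  intro n hnm
  cases hf : (List.range' n m).filter (fun c => row.getD c "" == "0") with
  | nil =>
    have hz : ∀ k ∈ List.range' n m, (row.getD k "" == "0") = false := by
      intro k hk
      have := List.filter_eq_nil_iff.mp hf k hk
      simpa using this
    simp only [pvBuildR]
    rw [show (C - (n : Int)).toNat = m by omega]
    symm
    rw [List.eq_replicate_iff]
    refine ⟨by simp, ?_⟩
    intro b hb
    obtain ⟨k, hk, rfl⟩ := List.mem_map.mp hb
    have hkm := List.mem_range'_1.mp hk
    apply pv_foldr_const
    intro j hj
    have hjm := List.mem_range'_1.mp hj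
    exact hz j (List.mem_range'_1.mpr ⟨by omega, by omega⟩)
  | cons z rest =>
    obtain ⟨h1, h2, h3, h4, h5⟩ := pv_filter_cons _ m n z rest hf
    simp only [pvBuildR]
    have hm1 : n + m - (z + 1) < m := by omega
    have hcast : ((z : Int) + 1) = ((z + 1 : Nat) : Int) := by push_cast; ring
    rw [show ((z : Int) + 1 - (n : Int)).toNat = z + 1 - n by omega]
    rw [h5, hcast, IH (n + m - (z + 1)) hm1 (z + 1) (by omega)]
    have hsplit : List.range' n m = List.range' n (z + 1 - n) ++ List.range' (z + 1) (n + m - (z + 1)) := by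
      have hA := List.range'_append (s := n) (m := z + 1 - n) (n := n + m - (z + 1)) (step := 1)
      rw [show n + 1 * (z + 1 - n) = z + 1 by omega, show (z + 1 - n) + (n + m - (z + 1)) = m by omega] at hA
      exact hA.symm
    conv_rhs => rw [hsplit]
    rw [List.map_append]
    congr 1
    · symm
      rw [List.eq_replicate_iff]
      refine ⟨by simp, ?_⟩
      intro b hb
      obtain ⟨k, hk, rfl⟩ := List.mem_map.mp hb
      have hkm := List.mem_range'_1.mp hk
      have hs1 : List.range' k (Cn - k) = List.range' k (z - k) ++ List.range' z (Cn - z) := by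
        have hA := List.range'_append (s := k) (m := z - k) (n := Cn - z) (step := 1)
        rw [show k + 1 * (z - k) = z by omega, show (z - k) + (Cn - z) = Cn - k by omega] at hA
        exact hA.symm
      have hs2 : List.range' z (Cn - z) = z :: List.range' (z + 1) (Cn - z - 1) := by
        rw [show Cn - z = (Cn - z - 1) + 1 by omega, List.range'_succ]
        simp
      rw [hs1, List.foldr_append, hs2]
      simp only [List.foldr, pvStep, h3, if_pos]
      apply pv_foldr_const
      intro j hj
      have hjm := List.mem_range'_1.mp hj
      exact h4 j (by omega) (by omega)

lemma pv_rowL_A (row : List String) (C : Int) :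
    ((List.range C.toNat).foldl
        (fun (p : Int × List Int) c =>
          (if row.getD c "" == "0" then (c : Int) else p.1,
           p.2.set c (if row.getD c "" == "0" then (c : Int) else p.1)))
        (-1, List.replicate C.toNat 0)).2
      = pvRowL row C := by
  have h := pv_left_inv row C.toNat (List.replicate C.toNat 0) (by simp)
  simp only [pvStep] at h
  rw [h]
  simp [pvRowL]

lemma pv_rowR_A (row : List String) (C : Int) :
    ((List.range C.toNat).reverse.foldl
        (fun (p : Int × List Int) c =>
          (if row.getD c "" == "0" then (c : Int) else p.1,
           p.2.set c (if row.getD c "" == "0" then (c : Int) else p.1)))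
        (C, List.replicate C.toNat 0)).2
      = pvRowR row C := by
  rw [List.foldl_reverse]
  have h := pv_right_inv row C C.toNat 0 (List.replicate C.toNat 0) (by simp)
  simp only [pvStep] at h
  rw [List.range_eq_range', h]
  simp only [List.take_zero, List.nil_append, List.append_nil, Nat.zero_add, pvRowR,
    pvStep, List.range_eq_range']
  simp

lemma pv_rowL_B (row : List String) (C : Int) :
    (let pl := ((List.range C.toNat).filter (fun c => row.getD c "" == "0")).foldl
        (fun (st : List Int × Int × Int) (z : Nat) =>
          (st.1 ++ List.replicate ((z : Int) - st.2.2).toNat st.2.1, (z : Int), (z : Int)))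
        ([], -1, 0);
      pl.1 ++ List.replicate (C - pl.2.2).toNat pl.2.1)
      = pvRowL row C := by
  rw [pv_bridgeL C ((List.range C.toNat).filter (fun c => row.getD c "" == "0")) [] (-1) 0]
  simp only [List.nil_append]
  by_cases hC : 0 ≤ C
  · have hCn : ((C.toNat : Int)) = C := Int.toNat_of_nonneg hC
    have h2 := pv_buildL_spec row C C.toNat hCn C.toNat 0 0 (-1) (le_refl 0) (by omega)
    rw [List.range_eq_range'] at *
    rw [show ((0 : Nat) : Int) = (0 : Int) by simp] at h2
    rw [h2]
    simp [pvRowL, List.range_eq_range']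
  · have hCn : C.toNat = 0 := by omega
    rw [hCn]
    simp only [List.range_zero, List.filter_nil, pvBuildL]
    rw [show (C - (0 : Int)).toNat = 0 by omega]
    simp [pvRowL, hCn]

lemma pv_rowR_B (row : List String) (C : Int) :
    (let pr := ((List.range C.toNat).filter (fun c => row.getD c "" == "0")).foldl
        (fun (st : List Int × Int) (z : Nat) =>
          (st.1 ++ List.replicate ((z : Int) + 1 - st.2).toNat (z : Int), (z : Int) + 1))
        ([], 0);
      pr.1 ++ List.replicate (C - pr.2).toNat C)
      = pvRowR row C := by
  rw [pv_bridgeR C ((List.range C.toNat).filter (fun c => row.getD c "" == "0")) [] 0]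
  simp only [List.nil_append]
  by_cases hC : 0 ≤ C
  · have hCn : ((C.toNat : Int)) = C := Int.toNat_of_nonneg hC
    have h2 := pv_buildR_spec row C C.toNat hCn C.toNat 0 (by omega)
    rw [List.range_eq_range'] at *
    rw [show ((0 : Nat) : Int) = (0 : Int) by simp] at h2
    rw [h2]
    simp [pvRowR, List.range_eq_range']
  · have hCn : C.toNat = 0 := by omega
    rw [hCn]
    simp only [List.range_zero, List.filter_nil, pvBuildR]
    rw [show (C - (0 : Int)).toNat = 0 by omega]
    simp [pvRowR, hCn]

lemma pv_A_eq (mall : List (List String)) (R C : Int) :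
    find_closest_zeros mall R C
      = ((List.range R.toNat).map (fun r => pvRowL (mall.getD r []) C),
         (List.range R.toNat).map (fun r => pvRowR (mall.getD r []) C)) := by
  simp only [find_closest_zeros]
  rw [show (List.range R.toNat).map (fun _ : Nat => List.replicate C.toNat (0 : Int))
        = List.replicate R.toNat (List.replicate C.toNat (0 : Int)) from by simp]
  rw [pv_outer]
  rw [pv_foldl_set_range', pv_foldl_set_range']
  refine Prod.ext ?_ ?_ <;> simp only
  · apply List.map_congr_left
    intro r _
    exact pv_rowL_A (mall.getD r []) C
  · apply List.map_congr_left
    intro r _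
    exact pv_rowR_A (mall.getD r []) C

lemma pv_B_eq (mall : List (List String)) (R C : Int) :
    find_closest_zeros_alt mall R C
      = ((List.range R.toNat).map (fun r => pvRowL (mall.getD r []) C),
         (List.range R.toNat).map (fun r => pvRowR (mall.getD r []) C)) := by
  simp only [find_closest_zeros_alt, List.map_map]
  refine Prod.ext ?_ ?_ <;> simp only
  · apply List.map_congr_left
    intro r _
    exact pv_rowL_B (mall.getD r []) C
  · apply List.map_congr_left
    intro r _
    exact pv_rowR_B (mall.getD r []) C

-- ===== VERDICT (by name: the statement is the Claim_ definition above) =====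
theorem find_closest_zeros_spec : Claim_equal_find_closest_zeros := by
  intro mall R C _ _
  unfold Spec_find_closest_zeros
  rw [pv_A_eq, pv_B_eq]
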